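-- pv_equiv track=rewrite | github.com/icyblu3/text_drawing | img_drawing.py | replace_chars
-- ===== SOURCE A (Python) =====
-- def replace_chars(org_str: str, sub_str: str, ind: int, count: int):
--     if len(sub_str) < count:
--         raise Exception("Less characters in substr than count")
--     if len(org_str) < ind + count:
--         raise Exception("Not enough chars in org str to replace")
--     char_list = []
--     for i in org_str:
--         char_list.append(i)
--     ctr = 0
--     while ctr < count:
--         char_list[ind + ctr] = sub_str[ctr]
--         ctr += 1
--     # Convert back into str
--     new_str = ""
--     for i in char_list:
--         new_str += i
--     return new_str
-- ===== SOURCE B (Python) =====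
-- def replace_chars(org_str: str, sub_str: str, ind: int, count: int):
--     if len(sub_str) < count:
--         raise Exception("Less characters in substr than count")
--     if len(org_str) < ind + count:
--         raise Exception("Not enough chars in org str to replace")
--     n_rep = max(count, 0)  # a replacement never removes characters; non-positive count replaces nothing
--     return org_str[:ind] + sub_str[:n_rep] + org_str[ind + n_rep:]
-- ===== Notes on version B (the rewrite author's own statement) =====
-- stated objective: simpler
-- what changed: Replaces the char-list materialization, the index-by-index overwrite while-loop and the char-by-char rejoin with a single three-piece slice concatenation org_str[:ind] + sub_str[:n_rep] + org_str[ind+n_rep:] with the slice length clamped to n_rep = max(count, 0).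
-- outside the precondition, e.g. on replace_chars('abc', 'XY', -1, 2): A returns 'YbX', B returns 'abXYbc'; on replace_chars('abc', 'XY', -2, 2): A returns 'aXY', B returns 'aXYabc'
import Mathlib
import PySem

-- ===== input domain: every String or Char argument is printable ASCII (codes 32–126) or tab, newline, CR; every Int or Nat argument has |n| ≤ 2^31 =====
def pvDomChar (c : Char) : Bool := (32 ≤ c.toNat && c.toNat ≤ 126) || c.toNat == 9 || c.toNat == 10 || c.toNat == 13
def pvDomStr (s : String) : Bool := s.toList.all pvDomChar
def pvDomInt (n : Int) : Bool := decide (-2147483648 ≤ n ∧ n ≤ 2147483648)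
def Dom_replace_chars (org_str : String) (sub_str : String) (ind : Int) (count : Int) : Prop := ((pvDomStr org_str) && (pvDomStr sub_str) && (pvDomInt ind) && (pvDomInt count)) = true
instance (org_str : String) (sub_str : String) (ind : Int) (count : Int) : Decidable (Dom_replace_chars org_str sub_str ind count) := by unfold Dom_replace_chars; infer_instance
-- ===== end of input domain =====

-- B replaces A's char-list build / index-overwrite loop / char-by-char rejoin by a three-piece
-- slice concatenation (objective: simpler); equivalence is claimed on Pre_ below.

-- ===== PORT A =====
-- the 'while ctr < count' loop; char_list[ind + ctr] = sub_str[ctr] is pySetD/pyGetD (in range on Pre_)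
def replaceCharsLoop (char_list : List Char) (sub : List Char) (ind : Int) (count : Int) (ctr : Int) : List Char :=
  if ctr < count then
    replaceCharsLoop (PySem.List.pySetD char_list (ind + ctr) (PySem.List.pyGetD sub ctr ' '))
      sub ind count (ctr + 1)
  else char_list
termination_by (count - ctr).toNat
decreasing_by omega

def replace_chars (org_str : String) (sub_str : String) (ind : Int) (count : Int) : String :=
  if PySem.Str.len sub_str < count then ""            -- raise Exception (outside Pre_)
  else if PySem.Str.len org_str < ind + count then "" -- raise Exception (outside Pre_)
  else
    let char_list := org_str.toList.foldl (fun acc i => acc ++ [i]) []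
    let char_list := replaceCharsLoop char_list sub_str.toList ind count 0
    String.ofList (char_list.foldl (fun acc i => acc ++ [i]) [])

-- ===== PORT B =====
def replace_chars_alt (org_str : String) (sub_str : String) (ind : Int) (count : Int) : String :=
  if PySem.Str.len sub_str < count then ""            -- raise Exception (outside Pre_)
  else if PySem.Str.len org_str < ind + count then "" -- raise Exception (outside Pre_)
  else
    let n_rep := max count 0
    String.ofList (PySem.List.slice org_str.toList none (some ind)
      ++ PySem.List.slice sub_str.toList none (some n_rep)
      ++ PySem.List.slice org_str.toList (some (ind + n_rep)) none)

-- ===== PRECONDITION & SPEC =====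
-- Pre_ excludes the inputs where A raises (its two guards, and the IndexError when a
-- positive count starts below -len(org_str)), and the corner of a negative ind whose
-- replacement window touches or crosses the start of the string: there A scatters the
-- overwrite through Python's per-index wraparound — an accident of its list-index loop,
-- outside the function's purpose — while B slices contiguously.
def Pre_replace_chars (org_str : String) (sub_str : String) (ind : Int) (count : Int) : Prop :=
  count ≤ PySem.Str.len sub_str ∧ ind + count ≤ PySem.Str.len org_str ∧
    (count ≤ 0 ∨ 0 ≤ ind ∨ (ind + count < 0 ∧ -(PySem.Str.len org_str) ≤ ind))
instance (org_str : String) (sub_str : String) (ind : Int) (count : Int) : Decidable (Pre_replace_chars org_str sub_str ind count) := by unfold Pre_replace_chars; infer_instance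

def pvWitness_replace_chars : String × String × Int × Int := ("hello", "XY", 1, 2)

def Spec_replace_chars (org_str : String) (sub_str : String) (ind : Int) (count : Int) (out : String) : Prop := out = replace_chars_alt org_str sub_str ind count
instance (org_str : String) (sub_str : String) (ind : Int) (count : Int) (out : String) : Decidable (Spec_replace_chars org_str sub_str ind count out) := by unfold Spec_replace_chars; infer_instance

-- ===== CLAIM (what is proved, stated in full; the proofs are below) =====
def Claim_equal_replace_chars : Prop := ∀ (org_str : String) (sub_str : String) (ind : Int) (count : Int), Dom_replace_chars org_str sub_str ind count → Pre_replace_chars org_str sub_str ind count → Spec_replace_chars org_str sub_str ind count (replace_chars org_str sub_str ind count)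

-- ===== LEMMAS AND PROOFS =====

lemma slice_to_clamp {α : Type} (xs : List α) (b : Int) :
    PySem.List.slice xs none (some b) = xs.take (PySem.List.clampIdx xs.length b) := by
  simp [PySem.List.slice]

lemma pySetD_neg {α : Type} (xs : List α) (i : Int) (v : α) (h1 : i < 0)
    (h2 : -(xs.length : Int) ≤ i) :
    PySem.List.pySetD xs i v = xs.set ((xs.length : Int) + i).toNat v := by
  unfold PySem.List.pySetD PySem.List.pySet? PySem.List.pyIdx?
  rw [if_neg (by omega), if_pos (by omega)]
  simp only [Option.map_some, Option.getD_some]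
  congr 1
  omega

lemma loop_eq (S : List Char) (ind count : Int) (p n : Nat)
    (hS : count.toNat ≤ S.length) (hpn : p + count.toNat ≤ n)
    (hset : ∀ (ys : List Char) (j : Int) (v : Char), ys.length = n → 0 ≤ j → j < count →
      PySem.List.pySetD ys (ind + j) v = ys.set (p + j.toNat) v) :
    ∀ (fuel : Nat) (ctr : Int) (xs : List Char), (count - ctr).toNat = fuel → 0 ≤ ctr →
      ctr ≤ count → xs.length = n →
      replaceCharsLoop xs S ind count ctr
        = xs.take (p + ctr.toNat) ++ (S.take count.toNat).drop ctr.toNat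
            ++ xs.drop (p + count.toNat) := by
  intro fuel
  induction fuel with
  | zero =>
    intro ctr xs hf h0 hc hn
    have hce : ctr = count := by omega
    rw [replaceCharsLoop, if_neg (by omega)]
    subst hce
    have hd : (S.take ctr.toNat).drop ctr.toNat = [] := by
      apply List.drop_eq_nil_of_le
      simp [List.length_take]
    rw [hd]
    simp [List.take_append_drop]
  | succ fuel ih =>
    intro ctr xs hf h0 hc hn
    have hlt : ctr < count := by omega
    rw [replaceCharsLoop, if_pos hlt]
    have hset' := hset xs ctr (PySem.List.pyGetD S ctr ' ') hn h0 hlt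
    rw [hset']
    rw [ih (ctr + 1) _ (by omega) (by omega) (by omega) (by simp [hn])]
    have hkx : p + ctr.toNat < xs.length := by omega
    have hcS : ctr.toNat < S.length := by omega
    have hv : PySem.List.pyGetD S ctr ' ' = S[ctr.toNat] :=
      PySem.List.pyGetD_eq_getElem S ' ' h0 (by omega)
    -- split xs at the written position
    have hxs : xs.set (p + ctr.toNat) (PySem.List.pyGetD S ctr ' ')
        = xs.take (p + ctr.toNat) ++ PySem.List.pyGetD S ctr ' ' :: xs.drop (p + ctr.toNat + 1) := by
      rw [List.set_eq_take_append_cons_drop, if_pos hkx]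
    rw [hxs]
    have hlen : (xs.take (p + ctr.toNat)).length = p + ctr.toNat := by
      simp [List.length_take]; omega
    have e1 : p + (ctr + 1).toNat = p + ctr.toNat + 1 := by omega
    have h1 : (xs.take (p + ctr.toNat) ++ PySem.List.pyGetD S ctr ' ' :: xs.drop (p + ctr.toNat + 1)).take (p + (ctr + 1).toNat)
        = xs.take (p + ctr.toNat) ++ [PySem.List.pyGetD S ctr ' '] := by
      rw [e1, List.take_append, hlen, List.take_take]
      have e2 : p + ctr.toNat + 1 - (p + ctr.toNat) = 1 := by omega
      have e3 : min (p + ctr.toNat + 1) (p + ctr.toNat) = p + ctr.toNat := by omega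
      rw [e2, e3]
      simp
    have h2 : (xs.take (p + ctr.toNat) ++ PySem.List.pyGetD S ctr ' ' :: xs.drop (p + ctr.toNat + 1)).drop (p + count.toNat)
        = xs.drop (p + count.toNat) := by
      rw [List.drop_append, hlen]
      have hnil : (xs.take (p + ctr.toNat)).drop (p + count.toNat) = [] :=
        List.drop_eq_nil_of_le (by simp [List.length_take]; omega)
      rw [hnil]
      have e4 : p + count.toNat - (p + ctr.toNat) = (count.toNat - ctr.toNat - 1) + 1 := by omega
      rw [e4, List.drop_succ_cons, List.drop_drop]
      simp only [List.nil_append]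
      congr 1
      omega
    rw [h1, h2]
    have h3 : (S.take count.toNat).drop ctr.toNat
        = PySem.List.pyGetD S ctr ' ' :: (S.take count.toNat).drop (ctr + 1).toNat := by
      have hlt' : ctr.toNat < (S.take count.toNat).length := by
        simp [List.length_take]; omega
      rw [List.drop_eq_getElem_cons hlt']
      congr 1
      · rw [hv, List.getElem_take]
      · congr 1
        omega
    rw [h3]
    simp [List.append_assoc]

-- Str.len expressed on toList
lemma str_len_eq (s : String) : PySem.Str.len s = (s.toList.length : Int) := by
  simp [PySem.Str.len]

-- ===== VERDICT (by name: the statement is the Claim_ definition above) =====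
theorem replace_chars_spec : Claim_equal_replace_chars := by
  intro org_str sub_str ind count _hdom hpre
  unfold Spec_replace_chars
  obtain ⟨hcs, hico, hcase⟩ := hpre
  rw [str_len_eq] at hcs hico
  unfold replace_chars replace_chars_alt
  rw [str_len_eq, str_len_eq, if_neg (by omega), if_neg (by omega), if_neg (by omega),
    if_neg (by omega)]
  simp only [PySem.List.foldl_append_singleton_eq_self, List.nil_append]
  by_cases hc0 : count ≤ 0
  · -- the loop runs zero times and n_rep = 0: both sides return org_str
    rw [replaceCharsLoop, if_neg (by omega)]
    have hm : max count 0 = 0 := by omega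
    rw [hm]
    simp only [Int.add_zero]
    rw [slice_to_clamp, slice_to_clamp, PySem.List.slice_some_none]
    have : PySem.List.clampIdx sub_str.toList.length 0 = 0 := by
      simp [PySem.List.clampIdx]
    rw [this]
    simp [List.take_append_drop]
  · -- count > 0
    have hcpos : 0 < count := by omega
    have h0c : (0:Int) ≤ count := by omega
    have hm : max count 0 = count := by omega
    rw [hm]
    rcases hcase with hc0' | hind | ⟨hneg, hlow⟩
    · omega
    · -- 0 ≤ ind
      rw [loop_eq sub_str.toList ind count ind.toNat org_str.toList.length (by omega) (by omega)
        (fun ys j v hy h0j hjc => by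
          rw [PySem.List.pySetD_of_nonneg ys v (by omega)]
          congr 1
          omega) ((count - 0).toNat) 0 org_str.toList rfl (by omega) (by omega) rfl]
      rw [PySem.List.slice_to org_str.toList hind, PySem.List.slice_to sub_str.toList h0c,
        PySem.List.slice_from org_str.toList (a := ind + count) (by omega)]
      have : (ind + count).toNat = ind.toNat + count.toNat := by omega
      rw [this]
      simp
    · -- ind < 0, replacement window strictly below the end of the string
      rw [str_len_eq] at hlow
      have hindneg : ind < 0 := by omega
      rw [loop_eq sub_str.toList ind count ((org_str.toList.length : Int) + ind).toNat
        org_str.toList.length (by omega) (by omega)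
        (fun ys j v hy h0j hjc => by
          rw [pySetD_neg ys (ind + j) v (by omega) (by rw [hy]; omega)]
          congr 1
          rw [hy]
          omega) ((count - 0).toNat) 0 org_str.toList rfl (by omega) (by omega) rfl]
      rw [slice_to_clamp, PySem.List.slice_to sub_str.toList h0c, PySem.List.slice_some_none]
      have hcl1 : PySem.List.clampIdx org_str.toList.length ind
          = ((org_str.toList.length : Int) + ind).toNat := by
        unfold PySem.List.clampIdx
        rw [if_pos hindneg, if_neg (by omega)]
      have hcl2 : PySem.List.clampIdx org_str.toList.length (ind + count)
          = ((org_str.toList.length : Int) + ind).toNat + count.toNat := by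
        unfold PySem.List.clampIdx
        rw [if_pos (by omega), if_neg (by omega)]
        omega
      rw [hcl1, hcl2]
      simp
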